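-- pv_equiv track=rewrite | github.com/cyrillOCR/Feature-Extraction | modules/means/mean_square_horizontal_vertical.py | suma_horizontal
-- ===== SOURCE A (Python) =====
-- def suma_horizontal(image):
--     suma=0
--     height=len(image)
--     width=len(image[0])
--     for i in range(0,height):
--         for j in range(0,width):
--             if(image[i][j]>200):
--                 for k in range(j+1,width):
--                     if image[i][k]>200:
--                         suma=suma+k-j
--                         break
--
--     return suma
-- ===== SOURCE B (Python) =====
-- def suma_horizontal(image):
--     # For each row, the sum of (distance to next bright pixel) over the first
--     # `width` columns telescopes to (last bright index - first bright index):
--     # one left-to-right pass per row tracking only those two indices.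
--     total = 0
--     width = len(image[0]) if image else 0
--     for row in image:
--         first = None
--         last = None
--         for j, v in enumerate(row[:width]):
--             if v > 200:
--                 if first is None:
--                     first = j
--                 last = j
--         if first is not None:
--             total += last - first
--     return total
-- ===== Notes on version B (the rewrite author's own statement) =====
-- stated objective: faster
-- what changed: Replaces the inner rescan for the next bright pixel (which makes A quadratic per row) by the telescoping identity sum of gaps = last bright index - first bright index, computed in one pass per row tracking only the first and last bright index.
import Mathlib
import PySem

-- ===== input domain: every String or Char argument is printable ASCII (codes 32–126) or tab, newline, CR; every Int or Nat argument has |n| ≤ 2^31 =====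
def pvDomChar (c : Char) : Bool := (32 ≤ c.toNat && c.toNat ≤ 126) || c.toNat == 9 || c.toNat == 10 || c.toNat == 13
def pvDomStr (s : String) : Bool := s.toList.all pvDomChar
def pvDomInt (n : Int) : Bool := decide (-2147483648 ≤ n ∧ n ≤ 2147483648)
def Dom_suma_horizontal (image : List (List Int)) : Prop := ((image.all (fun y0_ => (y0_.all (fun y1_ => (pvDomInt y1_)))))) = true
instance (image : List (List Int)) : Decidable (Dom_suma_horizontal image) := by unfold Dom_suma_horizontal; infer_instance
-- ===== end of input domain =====

-- B replaces A's inner rescan for the next bright pixel by a single pass per row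
-- tracking the first and last bright index (the gap sum telescopes to last - first): objective faster.

-- ===== PORT A =====
-- 'for k in range(j+1, width): if image[i][k] > 200: suma += k - j; break'
def innerA (row : List Int) (j k width : Nat) : Int :=
  if k < width then
    if PySem.List.pyGetD row (k : Int) 0 > 200 then (k : Int) - (j : Int)
    else innerA row j (k+1) width
  else 0
termination_by width - k

-- the 'for j in range(0, width)' body for one row
def rowSumA (row : List Int) (width : Nat) : Int :=
  (List.range width).foldl
    (fun s (j : Nat) => if PySem.List.pyGetD row (j : Int) 0 > 200 then s + innerA row j (j+1) width else s) 0

def suma_horizontal (image : List (List Int)) : Int :=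
  let width := (image.headD []).length
  image.foldl (fun s row => s + rowSumA row width) 0

-- ===== PORT B =====
-- 'for j, v in enumerate(row[:width])' tracking (first, last); 'row[:width]' with a
-- nonnegative stop is exactly List.take width row
def rowScanB (r : List Int) (j : Nat) (st : Option Nat × Option Nat) : Option Nat × Option Nat :=
  match r with
  | [] => st
  | v :: rest =>
    if v > 200 then rowScanB rest (j+1) (some (st.1.getD j), some j)
    else rowScanB rest (j+1) st

def rowValB (row : List Int) : Int :=
  match rowScanB row 0 (none, none) with
  | (some f, some l) => (l : Int) - (f : Int)
  | _ => 0

def suma_horizontal_alt (image : List (List Int)) : Int :=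
  let width := (image.headD []).length   -- len(image[0]) if image else 0
  image.foldl (fun s row => s + rowValB (row.take width)) 0

-- ===== PRECONDITION & SPEC =====
-- Pre_ excludes exactly the inputs on which A raises IndexError: the empty image
-- (len(image[0])) and images with a row shorter than the first row.
def Pre_suma_horizontal (image : List (List Int)) : Prop :=
  image ≠ [] ∧ ∀ row ∈ image, (image.headD []).length ≤ row.length
instance (image : List (List Int)) : Decidable (Pre_suma_horizontal image) := by
  unfold Pre_suma_horizontal; infer_instance

def pvWitness_suma_horizontal : List (List Int) := [[255, 0, 201], [0, 0, 0]]

def Spec_suma_horizontal (image : List (List Int)) (out : Int) : Prop := out = suma_horizontal_alt image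
instance (image : List (List Int)) (out : Int) : Decidable (Spec_suma_horizontal image out) := by unfold Spec_suma_horizontal; infer_instance

-- ===== CLAIM (what is proved, stated in full; the proofs are below) =====
def Claim_equal_suma_horizontal : Prop := ∀ (image : List (List Int)), Dom_suma_horizontal image → Pre_suma_horizontal image → Spec_suma_horizontal image (suma_horizontal image)

-- ===== LEMMAS AND PROOFS =====

-- index of the first / last bright pixel of a row, structurally
def firstB : List Int → Option Nat
  | [] => none
  | v :: r => if v > 200 then some 0 else (firstB r).map (· + 1)

def lastB : List Int → Option Nat
  | [] => none
  | v :: r =>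
    match lastB r with
    | some m => some (m + 1)
    | none => if v > 200 then some 0 else none

theorem firstB_none_iff (r : List Int) : firstB r = none ↔ lastB r = none := by
  induction r with
  | nil => simp [firstB, lastB]
  | cons v rest ih =>
    simp only [firstB, lastB]
    cases h : lastB rest with
    | none =>
      rw [h] at ih
      simp only [ih.2 rfl]
      split_ifs <;> simp
    | some m =>
      have : firstB rest ≠ none := fun hf => by simp [h] at ih; exact absurd (ih hf) (by simp)
      cases hf : firstB rest with
      | none => exact absurd hf this
      | some f => split_ifs <;> simp

theorem rowScanB_some (r : List Int) : ∀ (j f : Nat) (l0 : Option Nat),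
    rowScanB r j (some f, l0) =
      (some f, match lastB r with | some m => some (j + m) | none => l0) := by
  induction r with
  | nil => intro j f l0; simp [rowScanB, lastB]
  | cons v rest ih =>
    intro j f l0
    simp only [rowScanB, lastB]
    by_cases hv : v > 200
    · simp only [if_pos hv, Option.getD_some, ih]
      cases h : lastB rest with
      | none => simp
      | some m => simp; omega
    · simp only [if_neg hv, ih]
      cases h : lastB rest with
      | none => simp
      | some m => simp; omega

theorem rowScanB_none (r : List Int) : ∀ (j : Nat),
    rowScanB r j (none, none) = ((firstB r).map (j + ·), (lastB r).map (j + ·)) := by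
  induction r with
  | nil => intro j; simp [rowScanB, firstB, lastB]
  | cons v rest ih =>
    intro j
    simp only [rowScanB, firstB, lastB]
    by_cases hv : v > 200
    · simp only [if_pos hv, Option.getD_none, rowScanB_some]
      cases h : lastB rest with
      | none => simp
      | some m => simp; omega
    · simp only [if_neg hv, ih]
      cases h : lastB rest with
      | none =>
        have : firstB rest = none := (firstB_none_iff rest).2 h
        simp [this]
      | some m =>
        cases hf : firstB rest with
        | none => exact absurd ((firstB_none_iff rest).1 hf) (by simp [h])
        | some f => simp; constructor <;> omega

theorem rowValB_eq (row : List Int) :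
    rowValB row =
      (match firstB row, lastB row with
       | some f, some l => (l : Int) - (f : Int)
       | _, _ => 0) := by
  unfold rowValB
  rw [rowScanB_none]
  cases hf : firstB row <;> cases hl : lastB row <;> simp

theorem innerA_eq (row : List Int) (j k : Nat) :
    innerA row j k row.length =
      (match firstB (row.drop k) with
       | some f => ((k + f : Nat) : Int) - (j : Int)
       | none => 0) := by
  rw [innerA]
  by_cases hk : k < row.length
  · rw [if_pos hk, List.drop_eq_getElem_cons hk]
    simp only [PySem.List.pyGetD_natCast, List.getD_eq_getElem?_getD,
      List.getElem?_eq_getElem hk, Option.getD_some, firstB]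
    by_cases hb : row[k] > 200
    · simp [hb]
    · rw [if_neg hb, if_neg hb, innerA_eq row j (k+1)]
      cases h : firstB (row.drop (k+1)) with
      | none => simp
      | some f => simp; omega
  · rw [if_neg hk]
    rw [List.drop_eq_nil_of_le (by omega)]
    simp [firstB]
termination_by row.length - k

-- one row of A as a plain sum of gap terms
def rowT (row : List Int) : Int :=
  ((List.range row.length).map
    (fun jj => if row.getD jj 0 > 200 then
        (match firstB (row.drop (jj+1)) with
         | some f => (f : Int) + 1
         | none => 0)
      else 0)).sum

theorem rowSumA_eq_rowT (row : List Int) : rowSumA row row.length = rowT row := by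
  unfold rowSumA rowT
  have hbody : (fun (s : Int) (jj : Nat) =>
      if PySem.List.pyGetD row (jj : Int) 0 > 200 then s + innerA row jj (jj+1) row.length else s)
      = (fun s jj => s +
          (if row.getD jj 0 > 200 then
            (match firstB (row.drop (jj+1)) with
             | some f => (f : Int) + 1
             | none => 0)
          else 0)) := by
    funext s jj
    rw [PySem.List.pyGetD_natCast, innerA_eq]
    by_cases h : row.getD jj 0 > 200
    · rw [if_pos h, if_pos h]
      cases hf : firstB (row.drop (jj+1)) with
      | none => rfl
      | some f => push_cast; ring
    · rw [if_neg h, if_neg h]; omega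
  rw [hbody, PySem.List.foldl_add]
  omega

theorem rowT_cons (v : Int) (rest : List Int) :
    rowT (v :: rest) =
      (if v > 200 then
        (match firstB rest with
         | some f => (f : Int) + 1
         | none => 0)
       else 0) + rowT rest := by
  unfold rowT
  rw [List.length_cons, List.range_succ_eq_map, List.map_cons, List.map_map, List.sum_cons]
  have hmap : List.map
      ((fun jj => if (v :: rest).getD jj 0 > 200 then
          (match firstB (List.drop (jj + 1) (v :: rest)) with
           | some f => ((f : Int)) + 1
           | none => 0)
        else 0) ∘ Nat.succ) (List.range rest.length)
      = List.map (fun jj => if rest.getD jj 0 > 200 then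
          (match firstB (List.drop (jj + 1) rest) with
           | some f => ((f : Int)) + 1
           | none => 0)
        else 0) (List.range rest.length) := by
    apply List.map_congr_left
    intro jj _
    simp [List.drop_succ_cons]
  rw [hmap]
  congr 1

theorem rowT_eq_rowValB (row : List Int) : rowT row = rowValB row := by
  induction row with
  | nil => simp [rowT, rowValB, rowScanB]
  | cons v rest ih =>
    rw [rowT_cons, ih, rowValB_eq, rowValB_eq]
    simp only [firstB, lastB]
    by_cases hv : v > 200
    · simp only [if_pos hv]
      cases hl : lastB rest with
      | none =>
        have hf : firstB rest = none := (firstB_none_iff rest).2 hl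
        simp [hf]
      | some l =>
        cases hf : firstB rest with
        | none => exact absurd ((firstB_none_iff rest).1 hf) (by simp [hl])
        | some f => simp; ring
    · simp only [if_neg hv]  
      cases hl : lastB rest with
      | none =>
        have hf : firstB rest = none := (firstB_none_iff rest).2 hl
        simp [hf]
      | some l =>
        cases hf : firstB rest with
        | none => exact absurd ((firstB_none_iff rest).1 hf) (by simp [hl])
        | some f => simp

theorem innerA_take (row : List Int) (j : Nat) : ∀ (k width : Nat),
    innerA (row.take width) j k width = innerA row j k width := by
  intro k width
  conv_lhs => rw [innerA]
  conv_rhs => rw [innerA]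
  by_cases hk : k < width
  · rw [if_pos hk, if_pos hk]
    have hget : (row.take width).getD k 0 = row.getD k 0 := by
      simp [List.getD_eq_getElem?_getD, hk]
    simp only [PySem.List.pyGetD_natCast, hget]
    split_ifs with h
    · rfl
    · exact innerA_take row j (k+1) width
  · rw [if_neg hk, if_neg hk]
termination_by k width => width - k

theorem rowSumA_take (row : List Int) (width : Nat) :
    rowSumA (row.take width) width = rowSumA row width := by
  unfold rowSumA
  apply PySem.List.foldl_congr_mem
  intro s jj hjj
  have hjj' : jj < width := List.mem_range.mp hjj
  have hget : (row.take width).getD jj 0 = row.getD jj 0 := by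
    simp [List.getD_eq_getElem?_getD, hjj']
  simp only [PySem.List.pyGetD_natCast, hget, innerA_take]

theorem rowSumA_eq_rowValB (row : List Int) (width : Nat) (h : width ≤ row.length) :
    rowSumA row width = rowValB (row.take width) := by
  have hlen : (row.take width).length = width := by simp [List.length_take, Nat.min_eq_left h]
  have h2 := rowSumA_eq_rowT (row.take width)
  rw [hlen] at h2
  rw [← rowSumA_take, h2, rowT_eq_rowValB]

-- ===== VERDICT (by name: the statement is the Claim_ definition above) =====
theorem suma_horizontal_spec : Claim_equal_suma_horizontal := by
  intro image _ hpre
  unfold Spec_suma_horizontal suma_horizontal suma_horizontal_alt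
  obtain ⟨-, hlen⟩ := hpre
  apply PySem.List.foldl_congr_mem
  intro s row hrow
  rw [rowSumA_eq_rowValB row _ (hlen row hrow)]
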